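-- pv_equiv track=rewrite | github.com/WojtekWietrzny/ASD | Dynamiki/laboratorium 5 z gita/maximin.py | maximin
-- ===== SOURCE A (Python) =====
-- def maximin(T,k):
--     n = len(T)
--     dp = [[0]*(k) for i in range(n)]#k- number of cuts
--     S = [0]*n
--     S[0] = T[0]#sums
--     for i in range(1,n):
--         S[i] = S[i-1] + T[i]
--
--     for i in range(n):
--         dp[i][0] = S[i]
--
--     for x in range(1,k):#number of cuts
--         for i in range(x,n):#last index
--             for c in range(x-1,i):#mid point
--                 dp[i][x] = max(min(dp[c][x-1],S[i]-S[c]),dp[i][x])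
--
--     return dp[n-1][k-1]
-- ===== SOURCE B (Python) =====
-- def maximin(T, k):
--     S = []
--     tot = 0
--     for t in T:
--         tot += t
--         S.append(tot)
--     if k == 1:
--         return S[-1]
--     if k > len(T):
--         return 0  # more segments than elements: no valid partition, the DP value is 0
--
--     def feasible(v):
--         # can T be cut into k non-empty segments, each of sum >= v?  (v >= 1)
--         reach = [s >= v for s in S]
--         for _ in range(k - 1):
--             m = None  # min prefix sum S[c] over reachable c < i
--             nxt = []
--             for i in range(len(T)):
--                 nxt.append(m is not None and m <= S[i] - v)
--                 if reach[i]: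
--                     m = S[i] if m is None else min(m, S[i])
--             reach = nxt
--         return reach[-1]
--
--     lo = 0
--     hi = sum(abs(t) for t in T) + 1
--     # invariant: answer in [lo, hi); the DP value is max(0, best maximin), so lo starts at 0
--     while lo + 1 < hi:
--         mid = (lo + hi) // 2
--         if feasible(mid):
--             lo = mid
--         else:
--             hi = mid
--     return lo
-- ===== Notes on version B (the rewrite author's own statement) =====
-- stated objective: faster
-- what changed: B replaces A's O(n^2 k) last-cut DP table with binary search on the answer plus an O(nk) reachability check per candidate value (a linear scan maintaining the minimum prefix sum over reachable cut points), exploiting that A's value is the largest v>=0 for which T splits into k segments each of sum >= v.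
import Mathlib
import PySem

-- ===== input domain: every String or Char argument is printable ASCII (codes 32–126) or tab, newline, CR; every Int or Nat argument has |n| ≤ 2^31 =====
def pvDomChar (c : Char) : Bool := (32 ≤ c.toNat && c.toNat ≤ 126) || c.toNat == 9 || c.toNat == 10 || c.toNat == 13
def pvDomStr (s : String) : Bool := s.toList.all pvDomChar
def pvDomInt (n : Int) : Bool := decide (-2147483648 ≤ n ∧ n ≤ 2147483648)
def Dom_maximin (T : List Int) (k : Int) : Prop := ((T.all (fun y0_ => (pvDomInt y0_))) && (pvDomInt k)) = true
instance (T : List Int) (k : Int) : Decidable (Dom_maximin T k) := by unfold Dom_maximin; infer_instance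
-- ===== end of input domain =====

-- B replaces A's O(n^2 k) table DP with binary search on the answer plus a linear reachability
-- scan per candidate value (objective: faster).

-- ===== PORT A =====
-- 2-D table cell access/update: dp[i][x] reads, dp[i][x] = v writes (indices are in range inside Pre_).
def pvGet2 (dp : List (List Int)) (i x : Nat) : Int := (dp.getD i []).getD x 0
def pvSet2 (dp : List (List Int)) (i x : Nat) (v : Int) : List (List Int) :=
  dp.set i ((dp.getD i []).set x v)

def maximin (T : List Int) (k : Int) : Int :=
  let n := T.length
  let kN := k.toNat          -- [0]*(k) has length 0 for k ≤ 0, i.e. k.toNat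
  let dp0 : List (List Int) := List.replicate n (List.replicate kN 0)
  let S0 : List Int := (List.replicate n (0:Int)).set 0 (T.getD 0 0)   -- S[0] = T[0]
  let S := (List.range' 1 (n-1)).foldl
      (fun S i => S.set i (S.getD (i-1) 0 + T.getD i 0)) S0            -- for i in range(1,n)
  let dp1 := (List.range n).foldl (fun dp i => pvSet2 dp i 0 (S.getD i 0)) dp0
  let dp2 := (List.range' 1 (kN-1)).foldl (fun dp x =>                 -- for x in range(1,k)
      (List.range' x (n - x)).foldl (fun dp i =>                       -- for i in range(x,n)
        (List.range' (x-1) (i-(x-1))).foldl (fun dp c =>               -- for c in range(x-1,i)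
          pvSet2 dp i x (max (min (pvGet2 dp c (x-1)) (S.getD i 0 - S.getD c 0)) (pvGet2 dp i x)))
          dp) dp) dp1
  pvGet2 dp2 (n-1) (kN-1)

-- ===== PORT B =====
-- B's 'while lo + 1 < hi' binary-search loop; the fuel (hi - lo).toNat bounds the iteration
-- count (the gap shrinks by at least one each round), it never runs out on the call below
def bsearchB : Nat → (Int → Bool) → Int → Int → Int
  | 0, _, lo, _ => lo
  | fuel + 1, feas, lo, hi =>
      if lo + 1 < hi then
        let mid := PySem.Int.floordiv (lo + hi) 2
        if feas mid then bsearchB fuel feas mid hi else bsearchB fuel feas lo mid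
      else lo

def maximin_alt (T : List Int) (k : Int) : Int :=
  let S := (T.foldl (fun st t => (st.1 + t, st.2 ++ [st.1 + t])) ((0:Int), ([] : List Int))).2
  if k = 1 then S.getD (S.length - 1) 0       -- S[-1]; S ≠ [] under Pre_
  else if (T.length : Int) < k then 0         -- more segments than elements: the value is 0
  else
    let feasible : Int → Bool := fun v =>
      -- can T be cut into k non-empty segments, each of sum ≥ v? (called with v ≥ 1)
      let reach := (List.range (k.toNat - 1)).foldl (fun reach _ =>
          ((List.range T.length).foldl (fun st i =>
              let b : Bool := match st.1 with       -- m is not None and m <= S[i] - v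
                | some m => decide (m ≤ S.getD i 0 - v)
                | none => false
              let nxt := st.2 ++ [b]
              let m' := if reach.getD i false then  -- if reach[i]: m = S[i] if m is None else min(m, S[i])
                  some (match st.1 with | some m0 => min m0 (S.getD i 0) | none => S.getD i 0)
                else st.1
              (m', nxt))
            ((none : Option Int), ([] : List Bool))).2)
        (S.map (fun s => decide (v ≤ s)))
      reach.getD (T.length - 1) false             -- reach[-1]; nonempty since k ≤ len(T), 2 ≤ k
    let hi := (T.foldl (fun a t => a + |t|) 0) + 1
    bsearchB (hi - 0).toNat feasible 0 hi

-- ===== PRECONDITION & SPEC =====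
-- Pre_ excludes exactly the inputs where A raises IndexError: empty T (S[0] = T[0]) and k < 1
-- (the dp rows are empty, so dp[i][0] = S[i] fails).
def Pre_maximin (T : List Int) (k : Int) : Prop := T ≠ [] ∧ 1 ≤ k
instance (T : List Int) (k : Int) : Decidable (Pre_maximin T k) := by
  unfold Pre_maximin; infer_instance
def pvWitness_maximin : List Int × Int := ([3, -1, 4, 1, 5], 3)

def Spec_maximin (T : List Int) (k : Int) (out : Int) : Prop := out = maximin_alt T k
instance (T : List Int) (k : Int) (out : Int) : Decidable (Spec_maximin T k out) := by
  unfold Spec_maximin; infer_instance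

-- ===== CLAIM (what is proved, stated in full; the proofs are below) =====
def Claim_equal_maximin : Prop :=
  ∀ (T : List Int) (k : Int), Dom_maximin T k → Pre_maximin T k → Spec_maximin T k (maximin T k)

-- ===== LEMMAS AND PROOFS =====

-- prefix sums of T starting from accumulator a (the list both programs call S)
def pvPfx : Int → List Int → List Int
  | _, [] => []
  | a, t :: ts => (a + t) :: pvPfx (a + t) ts

-- the DP row after x refinement steps, as a pure function of the prefix-sum list P
def pvRows (P : List Int) (n : Nat) : Nat → List Int
  | 0 => P
  | x + 1 => (List.range n).map (fun i =>
      (((List.range' x (i - x)).map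
          (fun c => min ((pvRows P n x).getD c 0) (P.getD i 0 - P.getD c 0))).foldl max 0))

theorem pvPfx_length (a : Int) (T : List Int) : (pvPfx a T).length = T.length := by
  induction T generalizing a with
  | nil => rfl
  | cons t ts ih => simp [pvPfx, ih]

theorem pvPfx_getD_succ (a : Int) (T : List Int) (j : Nat) (hj : j + 1 < T.length) :
    (pvPfx a T).getD (j + 1) 0 = (pvPfx a T).getD j 0 + T.getD (j + 1) 0 := by
  induction T generalizing a j with
  | nil => simp at hj
  | cons t ts ih =>
      cases j with
      | zero =>
          cases ts with
          | nil => simp at hj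
          | cons u us => simp [pvPfx]
      | succ m =>
          simp only [pvPfx, List.getD_cons_succ]
          exact ih (a + t) m (by simpa using hj)

theorem getD_set_eq {α : Type} (l : List α) (i j : Nat) (a d : α) :
    (l.set i a).getD j d = if j = i ∧ i < l.length then a else l.getD j d := by
  induction l generalizing i j with
  | nil => simp
  | cons h t ih =>
      cases i with
      | zero => cases j <;> simp
      | succ i' =>
          cases j with
          | zero => simp
          | succ j' =>
              simp only [List.set_cons_succ, List.getD_cons_succ, List.length_cons, ih]
              have : (j' = i' ∧ i' < t.length) ↔ (j' + 1 = i' + 1 ∧ i' + 1 < t.length + 1) := by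
                omega
              rw [if_congr this rfl rfl]

theorem pvGet2_set2 (dp : List (List Int)) (i x : Nat) (v : Int) (i' x' : Nat)
    (hi : i < dp.length) (hx : x < (dp.getD i []).length) :
    pvGet2 (pvSet2 dp i x v) i' x' =
      if i' = i ∧ x' = x then v else pvGet2 dp i' x' := by
  unfold pvGet2 pvSet2
  rw [getD_set_eq]
  by_cases hii : i' = i
  · subst hii
    rw [if_pos ⟨rfl, hi⟩, getD_set_eq]
    by_cases hxx : x' = x
    · rw [if_pos ⟨hxx, hxx ▸ hx⟩, if_pos ⟨rfl, hxx⟩]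
    · rw [if_neg (by tauto), if_neg (by tauto)]
  · rw [if_neg (by tauto), if_neg (by tauto)]

def pvGood (n kN : Nat) (dp : List (List Int)) : Prop :=
  dp.length = n ∧ ∀ j, j < n → (dp.getD j []).length = kN

theorem pvGood_set2 {n kN : Nat} {dp : List (List Int)} (hg : pvGood n kN dp)
    (i x : Nat) (v : Int) : pvGood n kN (pvSet2 dp i x v) := by
  refine ⟨by simp [pvSet2, hg.1], fun j hj => ?_⟩
  unfold pvSet2
  rw [getD_set_eq]
  by_cases hji : j = i ∧ i < dp.length
  · rw [if_pos hji, List.length_set]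
    exact hji.1 ▸ hg.2 j hj
  · rw [if_neg hji]
    exact hg.2 j hj

-- value of a computed row at a valid index
theorem pvRows_getD (P : List Int) (n : Nat) (x i : Nat) (hi : i < n) :
    (pvRows P n (x + 1)).getD i 0 =
      ((List.range' x (i - x)).map
          (fun c => min ((pvRows P n x).getD c 0) (P.getD i 0 - P.getD c 0))).foldl max 0 := by
  have hlen : i < ((List.range n).map (fun i =>
      (((List.range' x (i - x)).map
          (fun c => min ((pvRows P n x).getD c 0) (P.getD i 0 - P.getD c 0))).foldl max 0))).length := by
    simpa using hi
  rw [show pvRows P n (x + 1) = (List.range n).map (fun i =>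
      (((List.range' x (i - x)).map
          (fun c => min ((pvRows P n x).getD c 0) (P.getD i 0 - P.getD c 0))).foldl max 0)) from rfl]
  rw [List.getD_eq_getElem _ _ hlen]
  simp

theorem pvRows_zero_of_le (P : List Int) (n : Nat) (x i : Nat) (hi : i < n) (hxi : i ≤ x) :
    (pvRows P n (x + 1)).getD i 0 = 0 := by
  rw [pvRows_getD P n x i hi, Nat.sub_eq_zero_of_le hxi]
  rfl

-- B's accumulating prefix-sum loop builds pvPfx
theorem pvBS (T : List Int) (a : Int) (L : List Int) :
    (T.foldl (fun st t => (st.1 + t, st.2 ++ [st.1 + t])) (a, L)).2 = L ++ pvPfx a T := by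
  induction T generalizing a L with
  | nil => simp [pvPfx]
  | cons t ts ih => simp [List.foldl_cons, ih, pvPfx]

-- A's S-building loop computes pvPfx (invariant form)
theorem pvAS (T : List Int) (hT : T ≠ []) (j : Nat) (hj : j ≤ T.length - 1) :
    (List.range' 1 j).foldl (fun S i => S.set i (S.getD (i - 1) 0 + T.getD i 0))
        ((List.replicate T.length (0 : Int)).set 0 (T.getD 0 0))
    = (pvPfx 0 T).take (j + 1) ++ List.replicate (T.length - (j + 1)) 0 := by
  induction j with
  | zero =>
      cases T with
      | nil => exact absurd rfl hT
      | cons t ts => simp [pvPfx, List.replicate_succ]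
  | succ m ih =>
      have hm : m ≤ T.length - 1 := by omega
      have hm2 : m + 2 ≤ T.length := by
        cases T with
        | nil => exact absurd rfl hT
        | cons t ts => simp at hj ⊢; omega
      have hplen : (pvPfx 0 T).length = T.length := pvPfx_length 0 T
      rw [List.range'_concat, List.foldl_append, ih hm]
      simp only [List.foldl_cons, List.foldl_nil]
      rw [show 1 + 1 * m = m + 1 by omega]
      have htl : ((pvPfx 0 T).take (m + 1)).length = m + 1 := by
        rw [List.length_take]; omega
      have hget : ((pvPfx 0 T).take (m + 1) ++ List.replicate (T.length - (m + 1)) 0).getD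
          (m + 1 - 1) 0 = (pvPfx 0 T).getD m 0 := by
        rw [show m + 1 - 1 = m by omega]
        have h1 : m < ((pvPfx 0 T).take (m + 1)).length := by omega
        rw [List.getD_append _ _ _ _ h1, List.getD_eq_getElem _ _ h1, List.getElem_take,
          List.getD_eq_getElem _ _ (by omega)]
      rw [hget]
      have hsum : (pvPfx 0 T).getD m 0 + T.getD (m + 1) 0 = (pvPfx 0 T).getD (m + 1) 0 :=
        (pvPfx_getD_succ 0 T m (by omega)).symm
      rw [hsum]
      have hrep : List.replicate (T.length - (m + 1)) (0 : Int)
          = 0 :: List.replicate (T.length - (m + 2)) 0 := by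
        rw [show T.length - (m + 1) = (T.length - (m + 2)) + 1 by omega]
        rfl
      rw [hrep, List.set_append_right _ _ (by omega),
        show m + 1 - ((pvPfx 0 T).take (m + 1)).length = 0 by omega]
      have htake : (pvPfx 0 T).take (m + 1 + 1)
          = (pvPfx 0 T).take (m + 1) ++ [(pvPfx 0 T).getD (m + 1) 0] := by
        rw [List.take_add_one]
        congr 1
        rw [List.getElem?_eq_getElem (by omega), List.getD_eq_getElem _ _ (by omega)]
        rfl
      rw [htake]
      simp

-- the inner c-loop: updates only cell (i, x), whose value is the explicit fold
theorem pvCfold (P : List Int) (n kN : Nat) (i x : Nat) (hi : i < n) (hx : x < kN)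
    (hx1 : 1 ≤ x) (cs : List Nat) (dp : List (List Int)) (hg : pvGood n kN dp) :
    pvGood n kN (cs.foldl (fun dp c =>
        pvSet2 dp i x (max (min (pvGet2 dp c (x - 1)) (P.getD i 0 - P.getD c 0))
          (pvGet2 dp i x))) dp) ∧
    (∀ i' x', ¬(i' = i ∧ x' = x) →
      pvGet2 (cs.foldl (fun dp c =>
        pvSet2 dp i x (max (min (pvGet2 dp c (x - 1)) (P.getD i 0 - P.getD c 0))
          (pvGet2 dp i x))) dp) i' x' = pvGet2 dp i' x') ∧
    pvGet2 (cs.foldl (fun dp c =>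
        pvSet2 dp i x (max (min (pvGet2 dp c (x - 1)) (P.getD i 0 - P.getD c 0))
          (pvGet2 dp i x))) dp) i x
      = cs.foldl (fun v c => max (min (pvGet2 dp c (x - 1)) (P.getD i 0 - P.getD c 0)) v)
          (pvGet2 dp i x) := by
  induction cs generalizing dp with
  | nil => exact ⟨hg, fun _ _ _ => rfl, rfl⟩
  | cons c cs' ih =>
      have hib : i < dp.length := hg.1 ▸ hi
      have hxb : x < (dp.getD i []).length := (hg.2 i hi) ▸ hx
      set v0 : Int := max (min (pvGet2 dp c (x - 1)) (P.getD i 0 - P.getD c 0)) (pvGet2 dp i x)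
        with hv0
      set dp1 := pvSet2 dp i x v0 with hdp1
      have hg1 : pvGood n kN dp1 := pvGood_set2 hg i x v0
      have hset : ∀ i' x', pvGet2 dp1 i' x' = if i' = i ∧ x' = x then v0 else pvGet2 dp i' x' :=
        fun i' x' => pvGet2_set2 dp i x v0 i' x' hib hxb
      obtain ⟨ihg, ihunch, ihval⟩ := ih dp1 hg1
      refine ⟨ihg, ?_, ?_⟩
      · intro i' x' hne
        rw [List.foldl_cons]
        rw [ihunch i' x' hne, hset i' x', if_neg hne]
      · rw [List.foldl_cons, List.foldl_cons]
        have hcol : ∀ c', pvGet2 dp1 c' (x - 1) = pvGet2 dp c' (x - 1) := by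
          intro c'
          rw [hset c' (x - 1), if_neg (by omega)]
        have hfun : (fun v c' => max (min (pvGet2 dp1 c' (x - 1)) (P.getD i 0 - P.getD c' 0)) v)
            = (fun v c' => max (min (pvGet2 dp c' (x - 1)) (P.getD i 0 - P.getD c' 0)) v) := by
          funext v c'
          rw [hcol c']
        rw [ihval, hfun]
        have : pvGet2 dp1 i x = v0 := by rw [hset i x, if_pos ⟨rfl, rfl⟩]
        rw [this]

-- the dp[i][0] = S[i] initialisation loop
theorem pvInitfold (P : List Int) (n kN : Nat) (h1 : 1 ≤ kN) (b : Nat) :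
    ∀ (a : Nat) (dp : List (List Int)), pvGood n kN dp → a + b = n →
    (∀ i', i' < a → pvGet2 dp i' 0 = P.getD i' 0) →
    (∀ i' x', ¬(x' = 0 ∧ i' < a) → pvGet2 dp i' x' = 0) →
    pvGood n kN ((List.range' a b).foldl (fun dp i => pvSet2 dp i 0 (P.getD i 0)) dp) ∧
    (∀ i', i' < n →
      pvGet2 ((List.range' a b).foldl (fun dp i => pvSet2 dp i 0 (P.getD i 0)) dp) i' 0
        = P.getD i' 0) ∧
    (∀ i' x', x' ≠ 0 →
      pvGet2 ((List.range' a b).foldl (fun dp i => pvSet2 dp i 0 (P.getD i 0)) dp) i' x' = 0) := by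
  induction b with
  | zero =>
      intro a dp hg hab hprev hz
      refine ⟨hg, fun i' hi' => hprev i' (by omega), fun i' x' hx' => hz i' x' (by tauto)⟩
  | succ b' ih =>
      intro a dp hg hab hprev hz
      rw [List.range'_succ, List.foldl_cons]
      have ha : a < n := by omega
      have hib : a < dp.length := hg.1 ▸ ha
      have hxb : (0 : Nat) < (dp.getD a []).length := (hg.2 a ha) ▸ h1
      set dp1 := pvSet2 dp a 0 (P.getD a 0) with hdp1
      have hset : ∀ i' x', pvGet2 dp1 i' x' =
          if i' = a ∧ x' = 0 then P.getD a 0 else pvGet2 dp i' x' :=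
        fun i' x' => pvGet2_set2 dp a 0 (P.getD a 0) i' x' hib hxb
      refine ih (a + 1) dp1 (pvGood_set2 hg a 0 _) (by omega) ?_ ?_
      · intro i' hi'
        rw [hset i' 0]
        by_cases hia : i' = a
        · rw [if_pos ⟨hia, rfl⟩, hia]
        · rw [if_neg (by tauto)]
          exact hprev i' (by omega)
      · intro i' x' hx'
        rw [hset i' x', if_neg (by omega)]
        exact hz i' x' (by omega)

-- the middle i-loop for a fixed cut count x
theorem pvIfold (P : List Int) (n kN : Nat) (x : Nat) (hx1 : 1 ≤ x) (hx : x < kN) (b : Nat) :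
    ∀ (a : Nat) (dp : List (List Int)), pvGood n kN dp → x ≤ a → a + b = n →
    (∀ c, c < n → pvGet2 dp c (x - 1) = (pvRows P n (x - 1)).getD c 0) →
    (∀ i', a ≤ i' → pvGet2 dp i' x = 0) →
    pvGood n kN ((List.range' a b).foldl (fun dp i =>
        (List.range' (x - 1) (i - (x - 1))).foldl (fun dp c =>
          pvSet2 dp i x (max (min (pvGet2 dp c (x - 1)) (P.getD i 0 - P.getD c 0))
            (pvGet2 dp i x))) dp) dp) ∧
    (∀ i' x', ¬(x' = x ∧ a ≤ i') →
      pvGet2 ((List.range' a b).foldl (fun dp i =>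
        (List.range' (x - 1) (i - (x - 1))).foldl (fun dp c =>
          pvSet2 dp i x (max (min (pvGet2 dp c (x - 1)) (P.getD i 0 - P.getD c 0))
            (pvGet2 dp i x))) dp) dp) i' x' = pvGet2 dp i' x') ∧
    (∀ i', a ≤ i' → i' < n →
      pvGet2 ((List.range' a b).foldl (fun dp i =>
        (List.range' (x - 1) (i - (x - 1))).foldl (fun dp c =>
          pvSet2 dp i x (max (min (pvGet2 dp c (x - 1)) (P.getD i 0 - P.getD c 0))
            (pvGet2 dp i x))) dp) dp) i' x = (pvRows P n x).getD i' 0) := by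
  induction b with
  | zero =>
      intro a dp hg hax hab hcol hzero
      exact ⟨hg, fun _ _ _ => rfl, fun i' h1 h2 => by omega⟩
  | succ b' ih =>
      intro a dp hg hax hab hcol hzero
      rw [List.range'_succ, List.foldl_cons]
      have ha : a < n := by omega
      obtain ⟨cg, cunch, cval⟩ := pvCfold P n kN a x ha hx hx1
        (List.range' (x - 1) (a - (x - 1))) dp hg
      set dp1 := (List.range' (x - 1) (a - (x - 1))).foldl (fun dp c =>
          pvSet2 dp a x (max (min (pvGet2 dp c (x - 1)) (P.getD a 0 - P.getD c 0))
            (pvGet2 dp a x))) dp with hdp1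
      -- the freshly written cell equals the pure row value
      have hcell : pvGet2 dp1 a x = (pvRows P n x).getD a 0 := by
        rw [cval, hzero a le_rfl]
        obtain ⟨w, rfl⟩ : ∃ w, x = w + 1 := ⟨x - 1, by omega⟩
        rw [pvRows_getD P n w a ha]
        rw [List.foldl_map]
        have hcongr : (List.range' (w + 1 - 1) (a - (w + 1 - 1))).foldl
            (fun v c => max (min (pvGet2 dp c (w + 1 - 1)) (P.getD a 0 - P.getD c 0)) v) 0
          = (List.range' w (a - w)).foldl
            (fun v c => max (min ((pvRows P n w).getD c 0) (P.getD a 0 - P.getD c 0)) v) 0 := by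
          rw [show w + 1 - 1 = w by omega]
          apply PySem.List.foldl_congr_mem
          intro acc c hc
          have hcn : c < n := by
            have := List.mem_range'_1.mp hc
            omega
          have hcc := hcol c hcn
          rw [show w + 1 - 1 = w by omega] at hcc
          rw [hcc]
        rw [hcongr]
        congr 1
        funext v c
        exact max_comm _ _
      have hunch1 : ∀ i' x', ¬(i' = a ∧ x' = x) → pvGet2 dp1 i' x' = pvGet2 dp i' x' := cunch
      obtain ⟨ig, iunch, ival⟩ := ih (a + 1) dp1 cg (by omega) (by omega)
        (fun c hc => by rw [hunch1 c (x - 1) (by omega)]; exact hcol c hc)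
        (fun i' hi' => by rw [hunch1 i' x (by omega)]; exact hzero i' (by omega))
      refine ⟨ig, ?_, ?_⟩
      · intro i' x' hne
        rw [iunch i' x' (by omega), hunch1 i' x' (by omega)]
      · intro i' h1 h2
        by_cases hia : i' = a
        · subst hia
          rw [iunch i' x (by omega), hcell]
        · exact ival i' (by omega) h2

-- the outer x-loop
theorem pvXfold (P : List Int) (n kN : Nat) (m : Nat) :
    ∀ (x0 : Nat) (dp : List (List Int)), 1 ≤ x0 → x0 + m ≤ kN → pvGood n kN dp →
    (∀ c, c < n → pvGet2 dp c (x0 - 1) = (pvRows P n (x0 - 1)).getD c 0) →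
    (∀ y i', x0 ≤ y → pvGet2 dp i' y = 0) →
    (∀ c, c < n →
      pvGet2 ((List.range' x0 m).foldl (fun dp x =>
        (List.range' x (n - x)).foldl (fun dp i =>
          (List.range' (x - 1) (i - (x - 1))).foldl (fun dp c =>
            pvSet2 dp i x (max (min (pvGet2 dp c (x - 1)) (P.getD i 0 - P.getD c 0))
              (pvGet2 dp i x))) dp) dp) dp) c (x0 + m - 1)
      = (pvRows P n (x0 + m - 1)).getD c 0) := by
  induction m with
  | zero =>
      intro x0 dp hx0 hmk hg hcol hzero
      simpa using hcol
  | succ m' ih =>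
      intro x0 dp hx0 hmk hg hcol hzero
      rw [List.range'_succ, List.foldl_cons]
      have hxk : x0 < kN := by omega
      obtain ⟨w, hw⟩ : ∃ w, x0 = w + 1 := ⟨x0 - 1, by omega⟩
      by_cases hxn : x0 ≤ n
      · obtain ⟨ig, iunch, ival⟩ := pvIfold P n kN x0 hx0 hxk (n - x0) x0 dp hg le_rfl
          (by omega) hcol (fun i' _ => hzero x0 i' le_rfl)
        have hcol1 : ∀ c, c < n →
            pvGet2 ((List.range' x0 (n - x0)).foldl (fun dp i =>
              (List.range' (x0 - 1) (i - (x0 - 1))).foldl (fun dp c =>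
                pvSet2 dp i x0 (max (min (pvGet2 dp c (x0 - 1)) (P.getD i 0 - P.getD c 0))
                  (pvGet2 dp i x0))) dp) dp) c (x0 + 1 - 1)
            = (pvRows P n (x0 + 1 - 1)).getD c 0 := by
          intro c hc
          rw [show x0 + 1 - 1 = x0 by omega]
          rcases Nat.lt_or_ge c x0 with hcx | hcx
          · rw [iunch c x0 (by omega), hzero x0 c le_rfl, hw,
              pvRows_zero_of_le P n w c hc (by omega)]
          · exact ival c hcx hc
        have hzero1 : ∀ y i', x0 + 1 ≤ y →
            pvGet2 ((List.range' x0 (n - x0)).foldl (fun dp i =>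
              (List.range' (x0 - 1) (i - (x0 - 1))).foldl (fun dp c =>
                pvSet2 dp i x0 (max (min (pvGet2 dp c (x0 - 1)) (P.getD i 0 - P.getD c 0))
                  (pvGet2 dp i x0))) dp) dp) i' y = 0 := by
          intro y i' hy
          rw [iunch i' y (by omega)]
          exact hzero y i' (by omega)
        intro c hc
        rw [show x0 + (m' + 1) - 1 = (x0 + 1) + m' - 1 by omega]
        exact ih (x0 + 1) _ (by omega) (by omega) ig hcol1 hzero1 c hc
      · have hb : n - x0 = 0 := by omega
        rw [hb]
        simp only [List.range'_zero, List.foldl_nil]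
        have hcol1 : ∀ c, c < n → pvGet2 dp c (x0 + 1 - 1) = (pvRows P n (x0 + 1 - 1)).getD c 0 := by
          intro c hc
          rw [show x0 + 1 - 1 = x0 by omega, hzero x0 c le_rfl, hw,
            pvRows_zero_of_le P n w c hc (by omega)]
        intro c hc
        rw [show x0 + (m' + 1) - 1 = (x0 + 1) + m' - 1 by omega]
        exact ih (x0 + 1) dp (by omega) (by omega) hg hcol1
          (fun y i' hy => hzero y i' (by omega)) c hc


-- midpoint bounds for the binary-search correctness proof
theorem pvMidBounds (lo hi : Int) (h : lo + 1 < hi) :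
    lo < PySem.Int.floordiv (lo + hi) 2 ∧ PySem.Int.floordiv (lo + hi) 2 < hi := by
  rw [PySem.Int.floordiv_eq_ediv_of_pos (by norm_num)]
  omega

-- fold-max characterisations
theorem pvLeFoldlMax (l : List Int) (b v : Int) :
    v ≤ l.foldl max b ↔ v ≤ b ∨ ∃ a ∈ l, v ≤ a := by
  induction l generalizing b with
  | nil => simp
  | cons a l ih =>
      rw [List.foldl_cons, ih]
      constructor
      · rintro (h | ⟨c, hc, hvc⟩)
        · rcases le_max_iff.mp h with h | h
          · exact Or.inl h
          · exact Or.inr ⟨a, by simp, h⟩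
        · exact Or.inr ⟨c, by simp [hc], hvc⟩
      · rintro (h | ⟨c, hc, hvc⟩)
        · exact Or.inl (le_max_iff.mpr (Or.inl h))
        · rcases List.mem_cons.mp hc with rfl | hc
          · exact Or.inl (le_max_iff.mpr (Or.inr hvc))
          · exact Or.inr ⟨c, hc, hvc⟩

theorem pvFoldlMaxLe (l : List Int) (b B : Int) (hb : b ≤ B) (h : ∀ a ∈ l, a ≤ B) :
    l.foldl max b ≤ B := by
  induction l generalizing b with
  | nil => exact hb
  | cons a l ih =>
      rw [List.foldl_cons]
      exact ih _ (max_le hb (h a (by simp))) (fun c hc => h c (List.mem_cons_of_mem _ hc))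

theorem pvPfx_getD_eq (a : Int) (T : List Int) (i : Nat) (hi : i < T.length) :
    (pvPfx a T).getD i 0 = a + (T.take (i + 1)).sum := by
  induction T generalizing a i with
  | nil => simp at hi
  | cons t ts ih =>
      cases i with
      | zero => simp [pvPfx]
      | succ m =>
          simp only [pvPfx, List.getD_cons_succ, List.take_succ_cons, List.sum_cons]
          rw [ih (a + t) m (by simpa using hi)]
          ring

theorem pvSumLeAbs (L : List Int) : L.sum ≤ (L.map (fun t => |t|)).sum := by
  induction L with
  | nil => simp
  | cons a l ih =>
      simp only [List.sum_cons, List.map_cons]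
      exact add_le_add (le_abs_self a) ih

theorem pvAbsSum_nonneg (L : List Int) : 0 ≤ (L.map (fun t => |t|)).sum := by
  apply List.sum_nonneg
  intro y hy
  obtain ⟨t, _, rfl⟩ := List.mem_map.mp hy
  exact abs_nonneg t

theorem pvAbsTakeLe (L : List Int) (m : Nat) :
    ((L.take m).map (fun t => |t|)).sum ≤ (L.map (fun t => |t|)).sum := by
  rw [List.map_take, ← List.sum_take_add_sum_drop (L.map (fun t => |t|)) m]
  have h0 : 0 ≤ ((L.map (fun t => |t|)).drop m).sum :=
    List.sum_nonneg (fun y hy => by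
      obtain ⟨t, _, rfl⟩ := List.mem_map.mp (List.mem_of_mem_drop hy)
      exact abs_nonneg t)
  omega

theorem pvAbsDropLe (L : List Int) (m : Nat) :
    ((L.drop m).map (fun t => |t|)).sum ≤ (L.map (fun t => |t|)).sum := by
  rw [List.map_drop, ← List.sum_take_add_sum_drop (L.map (fun t => |t|)) m]
  have h0 : 0 ≤ ((L.map (fun t => |t|)).take m).sum :=
    List.sum_nonneg (fun y hy => by
      obtain ⟨t, _, rfl⟩ := List.mem_map.mp (List.mem_of_mem_take hy)
      exact abs_nonneg t)
  omega

-- any segment sum is at most the total absolute sum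
theorem pvSegLe (T : List Int) (c i : Nat) (hc : c ≤ i) (hi : i < T.length) :
    (pvPfx 0 T).getD i 0 - (pvPfx 0 T).getD c 0 ≤ (T.map (fun t => |t|)).sum := by
  rw [pvPfx_getD_eq 0 T i hi, pvPfx_getD_eq 0 T c (by omega)]
  have h1 : T.take (i + 1) = T.take (c + 1) ++ (T.drop (c + 1)).take (i - c) := by
    rw [← List.take_add]
    congr 1
    omega
  have h2 : (T.take (i + 1)).sum - (T.take (c + 1)).sum = ((T.drop (c + 1)).take (i - c)).sum := by
    rw [h1, List.sum_append]
    ring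
  have h3 := pvSumLeAbs ((T.drop (c + 1)).take (i - c))
  have h4 := pvAbsTakeLe (T.drop (c + 1)) (i - c)
  have h5 := pvAbsDropLe T (c + 1)
  omega

theorem pvAbsFold (T : List Int) :
    T.foldl (fun a t => a + |t|) 0 = (T.map (fun t => |t|)).sum := by
  rw [PySem.List.foldl_add]
  simp

theorem pvRow_nonneg (P : List Int) (n x i : Nat) (hi : i < n) :
    0 ≤ (pvRows P n (x + 1)).getD i 0 := by
  rw [pvRows_getD P n x i hi]
  exact (pvLeFoldlMax _ _ _).mpr (Or.inl le_rfl)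

theorem pvRow_le (T : List Int) (x i : Nat) (hi : i < T.length) :
    (pvRows (pvPfx 0 T) T.length (x + 1)).getD i 0 ≤ (T.map (fun t => |t|)).sum := by
  rw [pvRows_getD _ _ _ _ hi]
  apply pvFoldlMaxLe _ _ _ (pvAbsSum_nonneg T)
  intro a ha
  obtain ⟨c, hc, rfl⟩ := List.mem_map.mp ha
  have hcr := List.mem_range'_1.mp hc
  exact le_trans (min_le_right _ _) (pvSegLe T c i (by omega) hi)

-- the running minimum maintained by B's scan, as a pure function
def pvMO (prev : List Bool) (S : List Int) : Nat → Option Int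
  | 0 => none
  | j + 1 => if prev.getD j false then
        some (match pvMO prev S j with | some m0 => min m0 (S.getD j 0) | none => S.getD j 0)
      else pvMO prev S j

-- the bit B's scan appends at index i
def pvBbit (prev : List Bool) (S : List Int) (v : Int) (i : Nat) : Bool :=
  match pvMO prev S i with | some m => decide (m ≤ S.getD i 0 - v) | none => false

theorem pvMO_spec (prev : List Bool) (S : List Int) (i : Nat) :
    (pvMO prev S i = none ∧ ∀ c, c < i → prev.getD c false = false)
    ∨ (∃ m, pvMO prev S i = some m
        ∧ (∃ c, c < i ∧ prev.getD c false = true ∧ S.getD c 0 = m)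
        ∧ ∀ c, c < i → prev.getD c false = true → m ≤ S.getD c 0) := by
  induction i with
  | zero => exact Or.inl ⟨rfl, fun c hc => absurd hc (by omega)⟩
  | succ j ih =>
      by_cases hj : prev.getD j false = true
      · right
        rcases ih with ⟨hnone, hall⟩ | ⟨m, hm, ⟨c0, hc0, hb0, hs0⟩, hmin⟩
        · refine ⟨S.getD j 0, ?_, ⟨j, by omega, hj, rfl⟩, ?_⟩
          · simp only [pvMO, hj, if_pos, hnone]
          · intro c hc hb
            rcases Nat.lt_or_ge c j with h | h
            · exact absurd hb (by rw [hall c h]; simp)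
            · have : c = j := by omega
              subst this; exact le_rfl
        · refine ⟨min m (S.getD j 0), ?_, ?_, ?_⟩
          · simp only [pvMO, hj, if_pos, hm]
          · by_cases hms : m ≤ S.getD j 0
            · exact ⟨c0, by omega, hb0, by rw [hs0]; exact (min_eq_left hms).symm⟩
            · exact ⟨j, by omega, hj, (min_eq_right (by omega)).symm⟩
          · intro c hc hb
            rcases Nat.lt_or_ge c j with h | h
            · exact le_trans (min_le_left _ _) (hmin c h hb)
            · have : c = j := by omega
              subst this; exact min_le_right _ _
      · have hj' : prev.getD j false = false := by
          cases h : prev.getD j false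
          · rfl
          · exact absurd h hj
        have hpv : pvMO prev S (j + 1) = pvMO prev S j := by
          simp only [pvMO, hj', if_neg, Bool.false_eq_true, not_false_iff]
        rcases ih with ⟨hnone, hall⟩ | ⟨m, hm, hw, hmin⟩
        · left
          refine ⟨hpv ▸ hnone, fun c hc => ?_⟩
          rcases Nat.lt_or_ge c j with h | h
          · exact hall c h
          · have : c = j := by omega
            subst this; exact hj'
        · right
          obtain ⟨c0, hc0, hb0, hs0⟩ := hw
          refine ⟨m, hpv ▸ hm, ⟨c0, by omega, hb0, hs0⟩, fun c hc hb => ?_⟩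
          rcases Nat.lt_or_ge c j with h | h
          · exact hmin c h hb
          · have : c = j := by omega
            subst this
            exact absurd hb (by rw [hj']; simp)


theorem pvBbit_iff (prev : List Bool) (S : List Int) (v : Int) (i : Nat) :
    pvBbit prev S v i = true ↔
      ∃ c, c < i ∧ prev.getD c false = true ∧ S.getD c 0 ≤ S.getD i 0 - v := by
  unfold pvBbit
  rcases pvMO_spec prev S i with ⟨hnone, hall⟩ | ⟨m, hm, ⟨c0, hc0, hb0, hs0⟩, hmin⟩
  · rw [hnone]
    simp only [Bool.false_eq_true, false_iff]
    rintro ⟨c, hc, hb, _⟩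
    rw [hall c hc] at hb
    exact absurd hb (by simp)
  · rw [hm]
    simp only [decide_eq_true_eq]
    constructor
    · intro h
      exact ⟨c0, hc0, hb0, by omega⟩
    · rintro ⟨c, hc, hb, hle⟩
      have := hmin c hc hb
      omega

-- the scan's bit equals the comparison with the next DP row
theorem pvBit_eq_dp (T : List Int) (v : Int) (hv : 1 ≤ v) (x i : Nat) (hi : i < T.length)
    (prev : List Bool)
    (hprev : ∀ c, c < T.length → prev.getD c false
        = decide (v ≤ (pvRows (pvPfx 0 T) T.length x).getD c 0)) :
    pvBbit prev (pvPfx 0 T) v i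
      = decide (v ≤ (pvRows (pvPfx 0 T) T.length (x + 1)).getD i 0) := by
  rw [Bool.eq_iff_iff, pvBbit_iff, decide_eq_true_eq,
    pvRows_getD (pvPfx 0 T) T.length x i hi, pvLeFoldlMax]
  constructor
  · rintro ⟨c, hci, hb, hle⟩
    have hcn : c < T.length := by omega
    rw [hprev c hcn, decide_eq_true_eq] at hb
    have hxc : x ≤ c := by
      by_contra hcx
      push_neg at hcx
      cases x with
      | zero => omega
      | succ w =>
          rw [pvRows_zero_of_le (pvPfx 0 T) T.length w c hcn (by omega)] at hb
          omega
    right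
    refine ⟨min ((pvRows (pvPfx 0 T) T.length x).getD c 0)
        ((pvPfx 0 T).getD i 0 - (pvPfx 0 T).getD c 0),
      List.mem_map.mpr ⟨c, List.mem_range'_1.mpr ⟨hxc, by omega⟩, rfl⟩, ?_⟩
    exact le_min hb (by omega)
  · rintro (h0 | ⟨a, ha, hva⟩)
    · omega
    · obtain ⟨c, hc, rfl⟩ := List.mem_map.mp ha
      have hcr := List.mem_range'_1.mp hc
      have hci : c < i := by omega
      refine ⟨c, hci, ?_, ?_⟩
      · rw [hprev c (by omega), decide_eq_true_eq]
        exact le_trans hva (min_le_left _ _)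
      · have := le_trans hva (min_le_right _ _)
        omega

-- B's inner scan, characterised
theorem pvScan (prev : List Bool) (S : List Int) (v : Int) (bb : Nat) :
    ∀ (j : Nat) (L : List Bool),
    (List.range' j bb).foldl (fun st i =>
        let b : Bool := match st.1 with
          | some m => decide (m ≤ S.getD i 0 - v)
          | none => false
        let nxt := st.2 ++ [b]
        let m' := if prev.getD i false then
            some (match st.1 with | some m0 => min m0 (S.getD i 0) | none => S.getD i 0)
          else st.1
        (m', nxt)) (pvMO prev S j, L)
    = (pvMO prev S (j + bb), L ++ (List.range' j bb).map (pvBbit prev S v)) := by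
  induction bb with
  | zero => intro j L; simp
  | succ b' ih =>
      intro j L
      rw [List.range'_succ, List.foldl_cons, List.map_cons, List.append_cons,
        show j + (b' + 1) = (j + 1) + b' by omega]
      exact ih (j + 1) (L ++ [pvBbit prev S v j])

theorem pvScan0 (prev : List Bool) (S : List Int) (v : Int) (n : Nat) :
    ((List.range n).foldl (fun st i =>
        let b : Bool := match st.1 with
          | some m => decide (m ≤ S.getD i 0 - v)
          | none => false
        let nxt := st.2 ++ [b]
        let m' := if prev.getD i false then
            some (match st.1 with | some m0 => min m0 (S.getD i 0) | none => S.getD i 0)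
          else st.1
        (m', nxt)) ((none : Option Int), ([] : List Bool))).2
    = (List.range n).map (pvBbit prev S v) := by
  rw [List.range_eq_range']
  have h2 : (List.range' 0 n).foldl (fun st i =>
        let b : Bool := match st.1 with
          | some m => decide (m ≤ S.getD i 0 - v)
          | none => false
        let nxt := st.2 ++ [b]
        let m' := if prev.getD i false then
            some (match st.1 with | some m0 => min m0 (S.getD i 0) | none => S.getD i 0)
          else st.1
        (m', nxt)) ((none : Option Int), ([] : List Bool))
      = (pvMO prev S (0 + n), [] ++ (List.range' 0 n).map (pvBbit prev S v)) :=
    pvScan prev S v n 0 []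
  rw [h2]
  simp

-- the levels of B's feasibility check track the DP rows
theorem pvIterGood (T : List Int) (v : Int) (hv : 1 ≤ v) (m : Nat) :
    ∀ i, i < T.length →
    ((List.range m).foldl (fun reach _ =>
        ((List.range T.length).foldl (fun st i =>
            let b : Bool := match st.1 with
              | some m => decide (m ≤ (pvPfx 0 T).getD i 0 - v)
              | none => false
            let nxt := st.2 ++ [b]
            let m' := if reach.getD i false then
                some (match st.1 with
                  | some m0 => min m0 ((pvPfx 0 T).getD i 0)
                  | none => (pvPfx 0 T).getD i 0)
              else st.1
            (m', nxt))
          ((none : Option Int), ([] : List Bool))).2)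
      ((pvPfx 0 T).map (fun s => decide (v ≤ s)))).getD i false
    = decide (v ≤ (pvRows (pvPfx 0 T) T.length m).getD i 0) := by
  induction m with
  | zero =>
      intro i hi
      have hil : i < (pvPfx 0 T).length := by rw [pvPfx_length]; exact hi
      simp only [List.range_zero, List.foldl_nil]
      rw [List.getD_eq_getElem _ _ (by simpa using hil), List.getElem_map]
      show _ = decide (v ≤ (pvPfx 0 T).getD i 0)
      rw [List.getD_eq_getElem _ _ hil]
  | succ m' ih =>
      intro i hi
      rw [List.range_succ, List.foldl_append, List.foldl_cons, List.foldl_nil, pvScan0]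
      rw [List.getD_eq_getElem _ _ (by simpa using hi), List.getElem_map, List.getElem_range]
      exact pvBit_eq_dp T v hv m' i hi _ ih

-- binary search returns d when feas v decides v ≤ d (for v ≥ 1)
theorem pvBsearch (feas : Int → Bool) (d : Int)
    (hiff : ∀ v, 1 ≤ v → (feas v = true ↔ v ≤ d)) :
    ∀ (N : Nat) (lo hi : Int), (hi - lo).toNat ≤ N → 0 ≤ lo → lo ≤ d → d < hi →
      bsearchB N feas lo hi = d := by
  intro N
  induction N with
  | zero =>
      intro lo hi hN h0 hld hdh
      exfalso
      omega
  | succ N ih =>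
      intro lo hi hN h0 hld hdh
      show (if lo + 1 < hi then
          if feas (PySem.Int.floordiv (lo + hi) 2) = true
          then bsearchB N feas (PySem.Int.floordiv (lo + hi) 2) hi
          else bsearchB N feas lo (PySem.Int.floordiv (lo + hi) 2)
        else lo) = d
      by_cases hcond : lo + 1 < hi
      · rw [if_pos hcond]
        obtain ⟨hm1, hm2⟩ := pvMidBounds lo hi hcond
        by_cases hf : feas (PySem.Int.floordiv (lo + hi) 2) = true
        · rw [if_pos hf]
          have hmd := (hiff _ (by omega)).mp hf
          exact ih _ _ (by omega) (by omega) hmd hdh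
        · rw [if_neg hf]
          have hdm : d < PySem.Int.floordiv (lo + hi) 2 := by
            by_contra h
            push_neg at h
            exact hf ((hiff _ (by omega)).mpr h)
          exact ih _ _ (by omega) h0 hld hdm
      · rw [if_neg hcond]
        omega

-- A's port, characterised: it returns the pure DP value
theorem maximin_eq (T : List Int) (k : Int) (hT : T ≠ []) (hk : 1 ≤ k) :
    maximin T k = (pvRows (pvPfx 0 T) T.length (k.toNat - 1)).getD (T.length - 1) 0 := by
  have hn : 1 ≤ T.length := by
    cases T with
    | nil => exact absurd rfl hT
    | cons t ts => simp
  have hkN : 1 ≤ k.toNat := by omega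
  simp only [maximin]
  have hplen : (pvPfx 0 T).length = T.length := pvPfx_length 0 T
  have hAS : (List.range' 1 (T.length - 1)).foldl
      (fun S i => S.set i (S.getD (i - 1) 0 + T.getD i 0))
      ((List.replicate T.length (0 : Int)).set 0 (T.getD 0 0)) = pvPfx 0 T := by
    rw [pvAS T hT (T.length - 1) le_rfl, show T.length - 1 + 1 = T.length by omega]
    rw [Nat.sub_self, List.replicate_zero, List.append_nil,
      List.take_of_length_le (le_of_eq hplen)]
  rw [hAS]
  have hz0 : ∀ i' x',
      pvGet2 (List.replicate T.length (List.replicate k.toNat (0 : Int))) i' x' = 0 := by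
    intro i' x'
    unfold pvGet2
    rcases Nat.lt_or_ge i' T.length with h | h
    · have hrow : (List.replicate T.length (List.replicate k.toNat (0 : Int))).getD i' []
          = List.replicate k.toNat 0 := by
        rw [List.getD_eq_getElem _ _ (by simpa using h), List.getElem_replicate]
      rw [hrow]
      rcases Nat.lt_or_ge x' k.toNat with h2 | h2
      · rw [List.getD_eq_getElem _ _ (by simpa using h2), List.getElem_replicate]
      · rw [List.getD_eq_default _ _ (by simpa using h2)]
    · have hrow : (List.replicate T.length (List.replicate k.toNat (0 : Int))).getD i' []
          = [] := List.getD_eq_default _ _ (by simpa using h)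
      rw [hrow]
      rfl
  have hg0 : pvGood T.length k.toNat (List.replicate T.length (List.replicate k.toNat (0 : Int))) := by
    refine ⟨by simp, fun j hj => ?_⟩
    rw [List.getD_eq_getElem _ _ (by simpa using hj), List.getElem_replicate,
      List.length_replicate]
  rw [List.range_eq_range']
  obtain ⟨g1, col1, z1⟩ := pvInitfold (pvPfx 0 T) T.length k.toNat hkN T.length 0
    (List.replicate T.length (List.replicate k.toNat (0 : Int))) hg0 (by omega)
    (fun i' hi' => absurd hi' (by omega)) (fun i' x' _ => hz0 i' x')
  have hfinal := pvXfold (pvPfx 0 T) T.length k.toNat (k.toNat - 1) 1 _ le_rfl (by omega) g1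
    (fun c hc => col1 c hc) (fun y i' hy => z1 i' y (by omega))
  have := hfinal (T.length - 1) (by omega)
  rw [show 1 + (k.toNat - 1) - 1 = k.toNat - 1 by omega] at this
  exact this

-- ===== VERDICT (by name: the statement is the Claim_ definition above) =====
theorem maximin_spec : Claim_equal_maximin := by
  intro T k hdom hpre
  obtain ⟨hT, hk⟩ := hpre
  unfold Spec_maximin
  have hn : 1 ≤ T.length := by
    cases T with
    | nil => exact absurd rfl hT
    | cons t ts => simp
  rw [maximin_eq T k hT hk]
  simp only [maximin_alt]
  rw [pvBS T 0 [], List.nil_append]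
  by_cases hk1 : k = 1
  · rw [if_pos hk1, hk1]
    show (pvRows (pvPfx 0 T) T.length ((1 : Int).toNat - 1)).getD (T.length - 1) 0 = _
    rw [show (1 : Int).toNat - 1 = 0 from rfl, pvPfx_length]
    rfl
  · rw [if_neg hk1]
    by_cases hkn : (T.length : Int) < k
    · rw [if_pos hkn]
      rw [show k.toNat - 1 = (k.toNat - 2) + 1 by omega]
      exact pvRows_zero_of_le _ _ _ _ (by omega) (by omega)
    · rw [if_neg hkn]
      have hk2 : 2 ≤ k := by omega
      rw [pvAbsFold]
      set d := (pvRows (pvPfx 0 T) T.length (k.toNat - 1)).getD (T.length - 1) 0 with hd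
      have hd0 : 0 ≤ d := by
        rw [hd, show k.toNat - 1 = (k.toNat - 2) + 1 by omega]
        exact pvRow_nonneg _ _ _ _ (by omega)
      have hdU : d ≤ (T.map (fun t => |t|)).sum := by
        rw [hd, show k.toNat - 1 = (k.toNat - 2) + 1 by omega]
        exact pvRow_le T _ _ (by omega)
      symm
      apply pvBsearch _ d ?_ (((T.map (fun t => |t|)).sum + 1 - 0).toNat) 0 _ (by omega) le_rfl hd0
        (by omega)
      intro v hv
      have hval := pvIterGood T v hv (k.toNat - 1) (T.length - 1) (by omega)
      rw [hval, hd, decide_eq_true_eq]
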